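-- pv_equiv track=rewrite | github.com/jojonicho/algorithms | codeforces/dp-1600/487B.py | solve
-- ===== SOURCE A (Python) =====
-- from collections import deque
--
-- def solve(N, S, L, A):
--     qmax, qmin = deque(), deque()
--
--     F = [N + 1] * (N + 1)
--     F[0] = 0
--
--     q = deque()
--
--     j = 0  # leftIdx
--     for i in range(1, N + 1):
--         x = A[i]
--         # maintain monotonic queue
--         while qmax and A[qmax[-1]] <= x:  # increasing
--             qmax.pop()
--         qmax.append(i)
--         while qmin and A[qmin[-1]] >= x:  # decreasing
--             qmin.pop()
--         qmin.append(i)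
--
--         # increment j until max-min <= S
--         while j < i and qmax and qmin and A[qmax[0]] - A[qmin[0]] > S:
--             while qmax and qmax[0] <= j:
--                 qmax.popleft()
--             while qmin and qmin[0] <= j:
--                 qmin.popleft()
--             j += 1
--
--         # [j,i] is the longest segment now
--         if i >= L:
--             # insert i-L
--             while q and q[-1][1] >= F[i - L]:
--                 q.pop()
--             q.append((i - L, F[i - L]))
--         # j - 1 <= k <= i - L
--         while q and q[0][0] < j - 1:
--             q.popleft()
--
--         if q:
--             F[i] = q[0][1] + 1
--
--     return F[-1] if F[-1] <= N else -1
-- ===== SOURCE B (Python) =====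
-- def solve(N, S, L, A):
--     INF = N + 1
--     F = [INF] * (N + 1)
--     F[0] = 0
--     for i in range(1, N + 1):
--         mx = mn = A[i]
--         k = i - 1
--         while k >= 0:
--             # here mx/mn = max/min of A[k+1..i]
--             if mx - mn > S:
--                 break
--             if i - k >= L and F[k] + 1 < F[i]:
--                 F[i] = F[k] + 1
--             v = A[k]
--             if v > mx:
--                 mx = v
--             if v < mn:
--                 mn = v
--             k -= 1
--     return F[N] if F[N] <= N else -1
-- ===== Notes on version B (the rewrite author's own statement) =====
-- stated objective: simpler
-- what changed: Replaced the three monotonic deques and two-pointer sliding-window DP by a plain downward inner scan per position that maintains a running max/min and breaks as soon as the value range exceeds S.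
-- intended difference: For S < 0 with L = 1 (outside the problem's guarantee 0 <= S) A's two-pointer still treats every single-element segment as valid and returns N, while B returns -1, the intended answer since no segment can have max-min <= S < 0. — e.g. on solve(1, -1, 1, [0, 5]): A returns 1, B returns -1
-- outside the precondition, e.g. on solve(2, 0, 0, [0, 5, 5]): A returns -1, B returns 1
import Mathlib
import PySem

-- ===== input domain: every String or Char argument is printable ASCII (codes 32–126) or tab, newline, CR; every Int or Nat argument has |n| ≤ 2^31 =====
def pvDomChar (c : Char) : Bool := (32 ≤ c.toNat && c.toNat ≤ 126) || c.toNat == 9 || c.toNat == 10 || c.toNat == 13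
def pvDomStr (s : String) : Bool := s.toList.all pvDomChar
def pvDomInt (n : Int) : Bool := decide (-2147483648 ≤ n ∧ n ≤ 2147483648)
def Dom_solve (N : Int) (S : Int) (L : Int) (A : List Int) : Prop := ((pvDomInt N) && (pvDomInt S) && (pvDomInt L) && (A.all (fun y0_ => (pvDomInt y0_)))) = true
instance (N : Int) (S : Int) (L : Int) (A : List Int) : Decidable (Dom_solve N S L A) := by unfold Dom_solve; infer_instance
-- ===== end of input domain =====

-- B replaces A's three monotonic deques + two-pointer sliding-window DP by a plain
-- downward scan per position with a running max/min and an early break (simpler and shorter; it does more work per position).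

-- ===== PORT A =====
-- shared deque helper: Python "while dq and p(dq[-1]): dq.pop()"
def popBackWhile {α : Type} (p : α → Bool) (l : List α) : List α :=
  (l.reverse.dropWhile p).reverse

-- Python: while j < i and qmax and qmin and A[qmax[0]] - A[qmin[0]] > S: pop fronts <= j; j += 1
def aHeads (A : List Int) (S : Int) (qmax qmin : List Int) : Bool :=
  match qmax.head?, qmin.head? with
  | some tmx, some tmn => decide (PySem.List.pyGetD A tmx 0 - PySem.List.pyGetD A tmn 0 > S)
  | _, _ => false

-- fuel only makes the loop structurally recursive; it is always sufficient ((i-j).toNat)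
def aAdvance (A : List Int) (S : Int) (i : Int) :
    Nat → Int → List Int → List Int → Int × List Int × List Int
  | 0, j, qmax, qmin => (j, qmax, qmin)
  | fuel+1, j, qmax, qmin =>
    if decide (j < i) && aHeads A S qmax qmin then
      aAdvance A S i fuel (j+1) (qmax.dropWhile (fun t => decide (t ≤ j)))
        (qmin.dropWhile (fun t => decide (t ≤ j)))
    else (j, qmax, qmin)

-- one iteration of A's main for-loop; state = (qmax, qmin, j, q, F)
def aStep (A : List Int) (S L : Int)
    (st : List Int × List Int × Int × List (Int × Int) × List Int) (i : Int) :
    List Int × List Int × Int × List (Int × Int) × List Int :=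
  let x := PySem.List.pyGetD A i 0
  let qmax := popBackWhile (fun t => decide (PySem.List.pyGetD A t 0 ≤ x)) st.1 ++ [i]
  let qmin := popBackWhile (fun t => decide (PySem.List.pyGetD A t 0 ≥ x)) st.2.1 ++ [i]
  let jqq := aAdvance A S i (i - st.2.2.1).toNat st.2.2.1 qmax qmin
  let F := st.2.2.2.2
  let q := if i ≥ L then
      popBackWhile (fun kv => decide (kv.2 ≥ PySem.List.pyGetD F (i - L) 0)) st.2.2.2.1
        ++ [(i - L, PySem.List.pyGetD F (i - L) 0)]
    else st.2.2.2.1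
  let q := q.dropWhile (fun kv => decide (kv.1 < jqq.1 - 1))
  let F := match q.head? with
    | some kv => PySem.List.pySetD F i (kv.2 + 1)
    | none => F
  (jqq.2.1, jqq.2.2, jqq.1, q, F)

def solve (N : Int) (S : Int) (L : Int) (A : List Int) : Int :=
  let F0 := PySem.List.pySetD (List.replicate (N+1).toNat (N+1)) 0 0
  let st := (PySem.List.pyRange 1 (N+1) 1).foldl (aStep A S L) ([], [], 0, [], F0)
  let F := st.2.2.2.2
  if PySem.List.pyGetD F (-1) 0 ≤ N then PySem.List.pyGetD F (-1) 0 else -1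

-- ===== PORT B =====
-- Python: while k >= 0: if mx - mn > S: break; if i-k >= L and F[k]+1 < F[i]: F[i] = F[k]+1; fold A[k] into mx/mn; k -= 1
def bInner (A : List Int) (S L : Int) (i : Int) :
    Nat → Int → Int → Int → List Int → List Int
  | 0, _, _, _, F => F
  | fuel+1, k, mx, mn, F =>
    if 0 ≤ k then
      if S < mx - mn then F
      else
        let F := if L ≤ i - k ∧ PySem.List.pyGetD F k 0 + 1 < PySem.List.pyGetD F i 0 then
            PySem.List.pySetD F i (PySem.List.pyGetD F k 0 + 1)
          else F
        let v := PySem.List.pyGetD A k 0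
        bInner A S L i fuel (k-1) (if mx < v then v else mx) (if v < mn then v else mn) F
    else F

def solve_alt (N : Int) (S : Int) (L : Int) (A : List Int) : Int :=
  let F0 := PySem.List.pySetD (List.replicate (N+1).toNat (N+1)) 0 0
  let F := (PySem.List.pyRange 1 (N+1) 1).foldl
    (fun F i => bInner A S L i i.toNat (i-1) (PySem.List.pyGetD A i 0) (PySem.List.pyGetD A i 0) F) F0
  if PySem.List.pyGetD F N 0 ≤ N then PySem.List.pyGetD F N 0 else -1

-- ===== PRECONDITION & SPEC =====
-- Pre_ excludes inputs outside the problem's natural domain: N < 0, L < 0 or len(A) <= N, where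
-- A raises IndexError, and L = 0, where A's deque holds only stale F-values so it returns -1.
def Pre_solve (N : Int) (S : Int) (L : Int) (A : List Int) : Prop :=
  0 ≤ N ∧ 1 ≤ L ∧ N < (A.length : Int)
instance (N : Int) (S : Int) (L : Int) (A : List Int) : Decidable (Pre_solve N S L A) := by
  unfold Pre_solve; infer_instance
def pvWitness_solve : Int × Int × Int × List Int := (2, 1, 1, [0, 1, 2])

-- For S < 0 with L = 1 (outside the guarantee 0 <= S) A still treats every single-element
-- segment as valid and returns N, while B returns -1, the intended answer since no
-- segment can have max-min <= S < 0.
def D_solve (N : Int) (S : Int) (L : Int) (A : List Int) : Prop := 1 ≤ N ∧ L = 1 ∧ S < 0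
instance (N : Int) (S : Int) (L : Int) (A : List Int) : Decidable (D_solve N S L A) := by
  unfold D_solve; infer_instance

def Spec_solve (N : Int) (S : Int) (L : Int) (A : List Int) (out : Int) : Prop :=
  ¬ D_solve N S L A → out = solve_alt N S L A
instance (N : Int) (S : Int) (L : Int) (A : List Int) (out : Int) : Decidable (Spec_solve N S L A out) := by
  unfold Spec_solve; infer_instance

def pvDiffWitness_solve : Int × Int × Int × List Int := (1, -1, 1, [0, 5])
def pvDiffWitnessOut_solve : Int × Int := (1, -1)

-- ===== CLAIM (what is proved, stated in full; the proofs are below) =====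
def Claim_unchanged_solve : Prop := ∀ (N : Int) (S : Int) (L : Int) (A : List Int),
  Dom_solve N S L A → Pre_solve N S L A → Spec_solve N S L A (solve N S L A)
def Claim_changed_solve : Prop :=
  Dom_solve (pvDiffWitness_solve.1) (pvDiffWitness_solve.2.1) (pvDiffWitness_solve.2.2.1) (pvDiffWitness_solve.2.2.2) ∧
  Pre_solve (pvDiffWitness_solve.1) (pvDiffWitness_solve.2.1) (pvDiffWitness_solve.2.2.1) (pvDiffWitness_solve.2.2.2) ∧
  D_solve (pvDiffWitness_solve.1) (pvDiffWitness_solve.2.1) (pvDiffWitness_solve.2.2.1) (pvDiffWitness_solve.2.2.2) ∧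
  solve (pvDiffWitness_solve.1) (pvDiffWitness_solve.2.1) (pvDiffWitness_solve.2.2.1) (pvDiffWitness_solve.2.2.2) = pvDiffWitnessOut_solve.1 ∧
  solve_alt (pvDiffWitness_solve.1) (pvDiffWitness_solve.2.1) (pvDiffWitness_solve.2.2.1) (pvDiffWitness_solve.2.2.2) = pvDiffWitnessOut_solve.2 ∧
  pvDiffWitnessOut_solve.1 ≠ pvDiffWitnessOut_solve.2
def Claim_exact_solve : Prop := ∀ (N : Int) (S : Int) (L : Int) (A : List Int),
  Dom_solve N S L A → Pre_solve N S L A → D_solve N S L A → solve N S L A ≠ solve_alt N S L A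

-- ===== LEMMAS AND PROOFS =====
-- ===== generic interval and fold lemmas =====
def irange (l r : Int) : List Int := (List.range (r + 1 - l).toNat).map (fun d : Nat => l + (d : Int))

theorem irange_nil (l r : Int) (h : r < l) : irange l r = [] := by
  unfold irange
  have : (r + 1 - l).toNat = 0 := by omega
  simp [this]

theorem irange_cons (l r : Int) (h : l ≤ r) : irange l r = l :: irange (l+1) r := by
  unfold irange
  have h1 : (r + 1 - l).toNat = (r + 1 - (l+1)).toNat + 1 := by omega
  rw [h1, List.range_succ_eq_map]
  simp only [List.map_map, List.map_cons, List.cons.injEq]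
  refine ⟨by simp, ?_⟩
  apply List.map_congr_left; intro d _; simp [Function.comp]; omega

theorem irange_append (l r : Int) (h : l ≤ r) : irange l r = irange l (r-1) ++ [r] := by
  unfold irange
  have h1 : (r + 1 - l).toNat = (r - 1 + 1 - l).toNat + 1 := by omega
  rw [h1, List.range_succ]
  simp
  omega

theorem mem_irange (l r t : Int) : t ∈ irange l r ↔ l ≤ t ∧ t ≤ r := by
  unfold irange
  simp
  constructor
  · rintro ⟨d, hd, rfl⟩; omega
  · rintro ⟨h1, h2⟩; exact ⟨(t - l).toNat, by omega, by omega⟩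

theorem irange_sorted (l r : Int) : (irange l r).Pairwise (· < ·) := by
  unfold irange
  refine List.Pairwise.map _ ?_ List.pairwise_lt_range
  intro a b h; omega
def sMaxV (v : Int → Int) (l r : Int) : Int := (irange (l+1) r).foldl (fun m t => max m (v t)) (v l)
def sMinV (v : Int → Int) (l r : Int) : Int := (irange (l+1) r).foldl (fun m t => min m (v t)) (v l)

theorem foldl_max_init (v : Int → Int) (L : List Int) (a b : Int) :
    L.foldl (fun m t => max m (v t)) (max a b) = max a (L.foldl (fun m t => max m (v t)) b) := by
  induction L generalizing b with
  | nil => simp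
  | cons x xs ih => simp only [List.foldl_cons, max_assoc]; exact ih (max b (v x))

theorem foldl_min_init (v : Int → Int) (L : List Int) (a b : Int) :
    L.foldl (fun m t => min m (v t)) (min a b) = min a (L.foldl (fun m t => min m (v t)) b) := by
  induction L generalizing b with
  | nil => simp
  | cons x xs ih => simp only [List.foldl_cons, min_assoc]; exact ih (min b (v x))

theorem sMaxV_self (v : Int → Int) (l : Int) : sMaxV v l l = v l := by
  unfold sMaxV; rw [irange_nil _ _ (by omega)]; rfl

theorem sMinV_self (v : Int → Int) (l : Int) : sMinV v l l = v l := by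
  unfold sMinV; rw [irange_nil _ _ (by omega)]; rfl

theorem sMaxV_last (v : Int → Int) (l r : Int) (h : l < r) :
    sMaxV v l r = max (sMaxV v l (r-1)) (v r) := by
  unfold sMaxV
  rw [irange_append (l+1) r (by omega), List.foldl_append]
  rfl

theorem sMinV_last (v : Int → Int) (l r : Int) (h : l < r) :
    sMinV v l r = min (sMinV v l (r-1)) (v r) := by
  unfold sMinV
  rw [irange_append (l+1) r (by omega), List.foldl_append]
  rfl

theorem sMaxV_cons (v : Int → Int) (l r : Int) (h : l < r) :
    sMaxV v l r = max (v l) (sMaxV v (l+1) r) := by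
  unfold sMaxV
  rw [irange_cons (l+1) r (by omega), List.foldl_cons]
  exact foldl_max_init v _ (v l) (v (l+1))

theorem sMinV_cons (v : Int → Int) (l r : Int) (h : l < r) :
    sMinV v l r = min (v l) (sMinV v (l+1) r) := by
  unfold sMinV
  rw [irange_cons (l+1) r (by omega), List.foldl_cons]
  exact foldl_min_init v _ (v l) (v (l+1))

theorem le_sMaxV (v : Int → Int) (l r t : Int) (h1 : l ≤ t) (h2 : t ≤ r) :
    v t ≤ sMaxV v l r := by
  induction hd : (r - l).toNat generalizing r with
  | zero =>
    have hrl : l = r := by omega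
    subst hrl; have : t = l := by omega
    subst this; simp [sMaxV_self]
  | succ n ih =>
    have hlr : l < r := by omega
    rw [sMaxV_last v l r hlr]
    rcases eq_or_lt_of_le h2 with he | hlt
    · subst he; exact le_max_right _ _
    · exact le_trans (ih (r-1) (by omega) (by omega)) (le_max_left _ _)

theorem sMinV_le (v : Int → Int) (l r t : Int) (h1 : l ≤ t) (h2 : t ≤ r) :
    sMinV v l r ≤ v t := by
  induction hd : (r - l).toNat generalizing r with
  | zero =>
    have hrl : l = r := by omega
    subst hrl; have : t = l := by omega
    subst this; simp [sMinV_self]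
  | succ n ih =>
    have hlr : l < r := by omega
    rw [sMinV_last v l r hlr]
    rcases eq_or_lt_of_le h2 with he | hlt
    · subst he; exact min_le_right _ _
    · exact le_trans (min_le_left _ _) (ih (r-1) (by omega) (by omega))

theorem sMaxV_le (v : Int → Int) (l r c : Int) (hlr : l ≤ r)
    (hb : ∀ t, l ≤ t → t ≤ r → v t ≤ c) : sMaxV v l r ≤ c := by
  induction hd : (r - l).toNat generalizing r with
  | zero =>
    have hrl : l = r := by omega
    subst hrl; simp [sMaxV_self]; exact hb l le_rfl le_rfl
  | succ n ih =>
    have hlr' : l < r := by omega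
    rw [sMaxV_last v l r hlr']
    exact max_le (ih (r-1) (by omega) (fun t a b => hb t a (by omega)) (by omega))
      (hb r (by omega) le_rfl)

theorem le_sMinV (v : Int → Int) (l r c : Int) (hlr : l ≤ r)
    (hb : ∀ t, l ≤ t → t ≤ r → c ≤ v t) : c ≤ sMinV v l r := by
  induction hd : (r - l).toNat generalizing r with
  | zero =>
    have hrl : l = r := by omega
    subst hrl; simp [sMinV_self]; exact hb l le_rfl le_rfl
  | succ n ih =>
    have hlr' : l < r := by omega
    rw [sMinV_last v l r hlr']
    exact le_min (ih (r-1) (by omega) (fun t a b => hb t a (by omega)) (by omega))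
      (hb r (by omega) le_rfl)

theorem sMaxV_mono_left (v : Int → Int) (l' l r : Int) (h : l' ≤ l) (hr : l ≤ r) :
    sMaxV v l r ≤ sMaxV v l' r :=
  sMaxV_le v l r _ hr (fun t h1 h2 => le_sMaxV v l' r t (by omega) h2)

theorem sMinV_mono_left (v : Int → Int) (l' l r : Int) (h : l' ≤ l) (hr : l ≤ r) :
    sMinV v l' r ≤ sMinV v l r :=
  le_sMinV v l r _ hr (fun t h1 h2 => sMinV_le v l' r t (by omega) h2)

theorem sMaxV_mono_right (v : Int → Int) (l r r' : Int) (hlr : l ≤ r) (h : r ≤ r') :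
    sMaxV v l r ≤ sMaxV v l r' :=
  sMaxV_le v l r _ hlr (fun t h1 h2 => le_sMaxV v l r' t h1 (by omega))

theorem sMinV_mono_right (v : Int → Int) (l r r' : Int) (hlr : l ≤ r) (h : r ≤ r') :
    sMinV v l r' ≤ sMinV v l r :=
  le_sMinV v l r _ hlr (fun t h1 h2 => sMinV_le v l r' t h1 (by omega))

theorem sMinV_congr (v w : Int → Int) (l r : Int) (hlr : l ≤ r)
    (h : ∀ t, l ≤ t → t ≤ r → v t = w t) : sMinV v l r = sMinV w l r := by
  induction hd : (r - l).toNat generalizing r with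
  | zero =>
    have hrl : l = r := by omega
    subst hrl; simp [sMinV_self]; exact h l le_rfl le_rfl
  | succ n ih =>
    have hlr' : l < r := by omega
    rw [sMinV_last v l r hlr', sMinV_last w l r hlr',
      ih (r-1) (by omega) (fun t a b => h t a (by omega)) (by omega), h r (by omega) le_rfl]

theorem sMinV_neg (v : Int → Int) (l r : Int) (hlr : l ≤ r) :
    sMinV v l r = -(sMaxV (fun t => -(v t)) l r) := by
  induction hd : (r - l).toNat generalizing r with
  | zero =>
    have hrl : l = r := by omega
    subst hrl; simp [sMinV_self, sMaxV_self]
  | succ n ih =>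
    have hlr' : l < r := by omega
    rw [sMinV_last v l r hlr', sMaxV_last _ l r hlr', ih (r-1) (by omega) (by omega)]
    omega

theorem sMinV_add_one (v : Int → Int) (l r : Int) (hlr : l ≤ r) :
    sMinV (fun t => v t + 1) l r = sMinV v l r + 1 := by
  induction hd : (r - l).toNat generalizing r with
  | zero =>
    have hrl : l = r := by omega
    subst hrl; simp [sMinV_self]
  | succ n ih =>
    have hlr' : l < r := by omega
    rw [sMinV_last _ l r hlr', sMinV_last v l r hlr', ih (r-1) (by omega) (by omega)]
    omega
def mqSpec (v : Int → Int) (l r : Int) : List Int :=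
  (irange l r).filter (fun t => decide (t = r) || decide (sMaxV v (t+1) r < v t))

theorem mqSpec_nil (v : Int → Int) (l r : Int) (h : r < l) : mqSpec v l r = [] := by
  unfold mqSpec; rw [irange_nil _ _ h]; rfl

theorem mem_mqSpec (v : Int → Int) (l r t : Int) :
    t ∈ mqSpec v l r ↔ l ≤ t ∧ t ≤ r ∧ (t = r ∨ sMaxV v (t+1) r < v t) := by
  unfold mqSpec
  simp [List.mem_filter, mem_irange]
  tauto

theorem mqSpec_sorted (v : Int → Int) (l r : Int) : (mqSpec v l r).Pairwise (· < ·) :=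
  (irange_sorted l r).filter _

theorem mqSpec_val_lt (v : Int → Int) (l r s t : Int)
    (hs : s ∈ mqSpec v l r) (ht : t ∈ mqSpec v l r) (hst : s < t) : v t < v s := by
  rw [mem_mqSpec] at hs ht
  rcases hs with ⟨hs1, hs2, hs3⟩
  rcases ht with ⟨ht1, ht2, ht3⟩
  rcases hs3 with he | hlt
  · omega
  · exact lt_of_le_of_lt (le_sMaxV v (s+1) r t (by omega) ht2) hlt

theorem dropWhile_eq_filter_of_stable {α : Type} (p : α → Bool) :
    ∀ (l : List α), l.Pairwise (fun s t => p s = false → p t = false) →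
      l.dropWhile p = l.filter (fun x => !p x)
  | [], _ => rfl
  | x :: xs, hp => by
    rcases List.pairwise_cons.mp hp with ⟨hx, hxs⟩
    by_cases h : p x = true
    · rw [List.dropWhile_cons_of_pos h, List.filter_cons_of_neg (by simp [h]),
        dropWhile_eq_filter_of_stable p xs hxs]
    · have h' : p x = false := by simp at h; exact h
      rw [List.dropWhile_cons_of_neg (by simp [h']), List.filter_cons_of_pos (by simp [h'])]
      have : xs.filter (fun x => !p x) = xs := by
        rw [List.filter_eq_self]
        intro a ha; simp [hx a ha h']
      rw [this]

theorem popBackWhile_eq_filter {α : Type} (p : α → Bool) (l : List α)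
    (hp : l.Pairwise (fun s t => p t = false → p s = false)) :
    popBackWhile p l = l.filter (fun x => !p x) := by
  unfold popBackWhile
  rw [dropWhile_eq_filter_of_stable p l.reverse (by rwa [List.pairwise_reverse]),
    ← List.filter_reverse, List.reverse_reverse]

theorem filter_irange (l r c : Int) :
    (irange l r).filter (fun t => decide (c ≤ t)) = irange (max l c) r := by
  induction hd : (r + 1 - l).toNat generalizing l with
  | zero =>
    rw [irange_nil _ _ (by omega), irange_nil _ _ (by omega)]; rfl
  | succ n ih =>
    rw [irange_cons _ _ (by omega)]
    by_cases hc : c ≤ l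
    · rw [List.filter_cons_of_pos (by simp [hc]), ih (l+1) (by omega),
        irange_cons (max l c) r (by omega)]
      have h1 : max l c = l := by omega
      have h2 : max (l+1) c = l + 1 := by omega
      rw [h1, h2]
    · rw [List.filter_cons_of_neg (by simp; omega), ih (l+1) (by omega)]
      have : max (l+1) c = max l c := by omega
      rw [this]

theorem mqSpec_push (v : Int → Int) (l r : Int) (h : l ≤ r + 1) :
    popBackWhile (fun t => decide (v t ≤ v (r+1))) (mqSpec v l r) ++ [r+1] =
      mqSpec v l (r+1) := by
  rw [popBackWhile_eq_filter]
  · have happ : irange l (r+1) = irange l r ++ [r+1] := by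
      rw [irange_append l (r+1) h]; norm_num
    have hr1 : mqSpec v l (r+1) =
        (irange l r ++ [r+1]).filter
          (fun t => decide (t = r+1) || decide (sMaxV v (t+1) (r+1) < v t)) := by
      unfold mqSpec; rw [happ]
    rw [hr1, List.filter_append]
    have hlast : ([r+1] : List Int).filter
        (fun t => decide (t = r+1) || decide (sMaxV v (t+1) (r+1) < v t)) = [r+1] := by
      simp
    rw [hlast]
    unfold mqSpec
    rw [List.filter_filter]
    apply congrArg (· ++ [r+1])
    apply List.filter_congr
    intro t ht
    rw [mem_irange] at ht
    have hne : ¬ (t = r + 1) := by omega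
    by_cases hteq : t = r
    · subst hteq
      have hself : sMaxV v (t+1) (t+1) = v (t+1) := sMaxV_self v (t+1)
      simp only [hself, hne]
      by_cases h1 : v t ≤ v (t+1) <;> simp [h1] <;> omega
    · have ht2 : t < r := by omega
      have hmx : sMaxV v (t+1) (r+1) = max (sMaxV v (t+1) r) (v (r+1)) := by
        have := sMaxV_last v (t+1) (r+1) (by omega)
        simpa using this
      simp only [hmx, hteq, hne, decide_false, Bool.false_or]
      by_cases h1 : sMaxV v (t+1) r < v t <;> by_cases h2 : v t ≤ v (r+1) <;>
        simp [h1, h2] <;> omega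
  · apply (mqSpec_sorted v l r).imp_of_mem
    intro s t hs ht hst hft
    simp only [decide_eq_false_iff_not, not_le] at hft ⊢
    exact lt_trans hft (mqSpec_val_lt v l r s t hs ht hst)

theorem mqSpec_dropFront (v : Int → Int) (l r j : Int) :
    (mqSpec v l r).dropWhile (fun t => decide (t ≤ j)) = mqSpec v (max l (j+1)) r := by
  rw [dropWhile_eq_filter_of_stable]
  · have h1 : (mqSpec v l r).filter (fun t => !decide (t ≤ j)) =
        (mqSpec v l r).filter (fun t => decide (j+1 ≤ t)) := by
      apply List.filter_congr; intro t _
      by_cases h1 : t ≤ j <;> simp [h1] <;> omega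
    rw [h1]
    unfold mqSpec
    rw [List.filter_comm, filter_irange]
  · apply (mqSpec_sorted v l r).imp_of_mem
    intro s t hs ht hst hfs
    simp only [decide_eq_false_iff_not, not_le] at hfs ⊢
    omega

theorem mqSpec_head (v : Int → Int) (l r : Int) (hlr : l ≤ r) :
    ∃ t rest, mqSpec v l r = t :: rest ∧ v t = sMaxV v l r := by
  induction hd : (r - l).toNat generalizing l with
  | zero =>
    have hrl : l = r := by omega
    subst hrl
    refine ⟨l, [], ?_, (sMaxV_self v l).symm⟩
    unfold mqSpec
    rw [irange_cons _ _ le_rfl, irange_nil _ _ (by omega)]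
    simp
  | succ n ih =>
    have hlr' : l < r := by omega
    have hsplit : mqSpec v l r =
        (l :: irange (l+1) r).filter
          (fun t => decide (t = r) || decide (sMaxV v (t+1) r < v t)) := by
      unfold mqSpec; rw [irange_cons l r (by omega)]
    by_cases hc : sMaxV v (l+1) r < v l
    · refine ⟨l, mqSpec v (l+1) r, ?_, ?_⟩
      · rw [hsplit, List.filter_cons_of_pos (by simp; omega)]; rfl
      · rw [sMaxV_cons v l r hlr']; omega
    · rcases ih (l+1) (by omega) (by omega) with ⟨t, rest, heq, hval⟩
      refine ⟨t, rest, ?_, ?_⟩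
      · rw [hsplit, List.filter_cons_of_neg (by simp; omega)]; exact heq
      · rw [sMaxV_cons v l r hlr', hval]; omega
def ag (A : List Int) (t : Int) : Int := PySem.List.pyGetD A t 0
def nag (A : List Int) (t : Int) : Int := -(ag A t)
def rngI (A : List Int) (l r : Int) : Int := sMaxV (ag A) l r - sMinV (ag A) l r

theorem sMinV_ag_neg (A : List Int) (l r : Int) (h : l ≤ r) :
    sMinV (ag A) l r = -(sMaxV (nag A) l r) := sMinV_neg (ag A) l r h

def advJ (A : List Int) (S i : Int) : Nat → Int → Int
  | 0, j => j
  | fuel+1, j => if j < i ∧ S < rngI A (max j 1) i then advJ A S i fuel (j+1) else j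

theorem advJ_le_start (A : List Int) (S i : Int) :
    ∀ (fuel : Nat) (j : Int), j ≤ advJ A S i fuel j
  | 0, j => le_rfl
  | fuel+1, j => by
    unfold advJ
    split
    · exact le_trans (by omega) (advJ_le_start A S i fuel (j+1))
    · exact le_rfl

theorem advJ_le (A : List Int) (S i : Int) :
    ∀ (fuel : Nat) (j : Int), j ≤ i → advJ A S i fuel j ≤ i
  | 0, j, h => h
  | fuel+1, j, h => by
    unfold advJ
    split
    · next hc => exact advJ_le A S i fuel (j+1) (by omega)
    · exact h

theorem advJ_min (A : List Int) (S i : Int) :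
    ∀ (fuel : Nat) (j : Int), ∀ j'', j ≤ j'' → j'' < advJ A S i fuel j →
      S < rngI A (max j'' 1) i
  | 0, j, j'', h1, h2 => absurd h2 (by unfold advJ; omega)
  | fuel+1, j, j'', h1, h2 => by
    unfold advJ at h2
    split at h2
    · next hc =>
      rcases eq_or_lt_of_le h1 with he | hlt
      · subst he; exact hc.2
      · exact advJ_min A S i fuel (j+1) j'' (by omega) h2
    · omega

theorem advJ_exit (A : List Int) (S i : Int) :
    ∀ (fuel : Nat) (j : Int), (i - j).toNat ≤ fuel → j ≤ i →
      advJ A S i fuel j = i ∨ rngI A (max (advJ A S i fuel j) 1) i ≤ S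
  | 0, j, hf, hj => by unfold advJ; left; omega
  | fuel+1, j, hf, hj => by
    unfold advJ
    split
    · next hc => exact advJ_exit A S i fuel (j+1) (by omega) (by omega)
    · next hc =>
      by_cases h : j = i
      · left; exact h
      · right
        have h2 : ¬ S < rngI A (max j 1) i := fun hS => hc ⟨by omega, hS⟩
        omega

theorem aAdvance_spec (A : List Int) (S i : Int) (hi : 1 ≤ i) :
    ∀ (fuel : Nat) (j : Int), 0 ≤ j → j ≤ i →
      aAdvance A S i fuel j (mqSpec (ag A) (max j 1) i) (mqSpec (nag A) (max j 1) i) =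
        (advJ A S i fuel j, mqSpec (ag A) (max (advJ A S i fuel j) 1) i,
          mqSpec (nag A) (max (advJ A S i fuel j) 1) i)
  | 0, j, hj0, hji => by unfold aAdvance advJ; rfl
  | fuel+1, j, hj0, hji => by
    unfold aAdvance advJ
    by_cases hlt : j < i
    · have hl : max j 1 ≤ i := by omega
      rcases mqSpec_head (ag A) (max j 1) i hl with ⟨tmx, r1, he1, hv1⟩
      rcases mqSpec_head (nag A) (max j 1) i hl with ⟨tmn, r2, he2, hv2⟩
      have hheads : aHeads A S (mqSpec (ag A) (max j 1) i) (mqSpec (nag A) (max j 1) i) =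
          decide (S < rngI A (max j 1) i) := by
        rw [he1, he2]
        unfold aHeads
        simp only [List.head?_cons]
        have hagmn : PySem.List.pyGetD A tmn 0 = sMinV (ag A) (max j 1) i := by
          have h5 : -(ag A tmn) = sMaxV (nag A) (max j 1) i := hv2
          have h6 := sMinV_ag_neg A (max j 1) i hl
          show ag A tmn = sMinV (ag A) (max j 1) i
          omega
        have hagmx : PySem.List.pyGetD A tmx 0 = sMaxV (ag A) (max j 1) i := hv1
        rw [hagmx, hagmn]
        unfold rngI
        rfl
      rw [hheads]
      by_cases hS : S < rngI A (max j 1) i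
      · have hcond : (decide (j < i) && decide (S < rngI A (max j 1) i)) = true := by
          simp [hlt, hS]
        rw [if_pos hcond, if_pos ⟨hlt, hS⟩]
        have hd1 : (mqSpec (ag A) (max j 1) i).dropWhile (fun t => decide (t ≤ j)) =
            mqSpec (ag A) (max (j+1) 1) i := by
          rw [mqSpec_dropFront]
          congr 1; omega
        have hd2 : (mqSpec (nag A) (max j 1) i).dropWhile (fun t => decide (t ≤ j)) =
            mqSpec (nag A) (max (j+1) 1) i := by
          rw [mqSpec_dropFront]
          congr 1; omega
        rw [hd1, hd2]
        exact aAdvance_spec A S i hi fuel (j+1) (by omega) (by omega)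
      · have hcond : (decide (j < i) && decide (S < rngI A (max j 1) i)) = false := by
          simp [hS]
        rw [if_neg (by simp [hcond]), if_neg (by tauto)]
    · have hcond : (decide (j < i) && aHeads A S (mqSpec (ag A) (max j 1) i)
          (mqSpec (nag A) (max j 1) i)) = false := by
        simp [hlt]
      rw [if_neg (by simp [hcond]), if_neg (by tauto)]

def JA (A : List Int) (S : Int) : Nat → Int
  | 0 => 0
  | n+1 => advJ A S ((n:Int)+1) (((n:Int)+1 - JA A S n).toNat) (JA A S n)

theorem JA_nonneg (A : List Int) (S : Int) : ∀ n, 0 ≤ JA A S n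
  | 0 => le_rfl
  | n+1 => le_trans (JA_nonneg A S n) (advJ_le_start A S _ _ _)

theorem JA_le (A : List Int) (S : Int) : ∀ n, JA A S n ≤ (n : Int)
  | 0 => le_rfl
  | n+1 => by
    have := advJ_le A S ((n:Int)+1) (((n:Int)+1 - JA A S n).toNat) (JA A S n)
      (le_trans (JA_le A S n) (by omega))
    unfold JA
    push_cast
    omega

theorem JA_mono (A : List Int) (S : Int) (n : Nat) : JA A S n ≤ JA A S (n+1) :=
  advJ_le_start A S _ _ _

theorem JA_min (A : List Int) (S : Int) :
    ∀ (n : Nat), ∀ j'', 0 ≤ j'' → j'' < JA A S n → S < rngI A (max j'' 1) (n : Int)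
  | 0, j'', h1, h2 => by unfold JA at h2; omega
  | n+1, j'', h1, h2 => by
    unfold JA at h2
    by_cases hge : JA A S n ≤ j''
    · have := advJ_min A S ((n:Int)+1) (((n:Int)+1 - JA A S n).toNat) (JA A S n) j'' hge h2
      push_cast
      convert this using 3
    · have hge2 : j'' < JA A S n := by omega
      have hn1 : 1 ≤ JA A S n := by omega
      have hIH := JA_min A S n j'' h1 hge2
      have hln : max j'' 1 ≤ (n : Int) := by
        have := JA_le A S n; omega
      have h3 : sMaxV (ag A) (max j'' 1) (n:Int) ≤ sMaxV (ag A) (max j'' 1) ((n:Int)+1) :=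
        sMaxV_mono_right _ _ _ _ hln (by omega)
      have h4 : sMinV (ag A) (max j'' 1) ((n:Int)+1) ≤ sMinV (ag A) (max j'' 1) (n:Int) :=
        sMinV_mono_right _ _ _ _ hln (by omega)
      unfold rngI at hIH ⊢
      push_cast
      omega

theorem JA_exit (A : List Int) (S : Int) (n : Nat) :
    JA A S (n+1) = (n:Int)+1 ∨ rngI A (max (JA A S (n+1)) 1) ((n:Int)+1) ≤ S := by
  unfold JA
  exact advJ_exit A S ((n:Int)+1) _ (JA A S n) le_rfl
    (le_trans (JA_le A S n) (by omega))
def finit (N : Int) : List Int := PySem.List.pySetD (List.replicate (N+1).toNat (N+1)) 0 0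

def Fref (N : Int) (A : List Int) (S L : Int) : Nat → List Int
  | 0 => finit N
  | n+1 =>
    if max (JA A S (n+1) - 1) 0 ≤ (n:Int) + 1 - L then
      PySem.List.pySetD (Fref N A S L n) ((n:Int)+1)
        (sMinV (fun k => PySem.List.pyGetD (Fref N A S L n) k 0)
          (max (JA A S (n+1) - 1) 0) ((n:Int) + 1 - L) + 1)
    else Fref N A S L n

theorem Fref_zero (N : Int) (A : List Int) (S L : Int) : Fref N A S L 0 = finit N := rfl

theorem Fref_succ (N : Int) (A : List Int) (S L : Int) (n : Nat) :
    Fref N A S L (n+1) =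
      (if max (JA A S (n+1) - 1) 0 ≤ (n:Int) + 1 - L then
        PySem.List.pySetD (Fref N A S L n) ((n:Int)+1)
          (sMinV (fun k => PySem.List.pyGetD (Fref N A S L n) k 0)
            (max (JA A S (n+1) - 1) 0) ((n:Int) + 1 - L) + 1)
      else Fref N A S L n) := rfl

theorem length_Fref (N : Int) (A : List Int) (S L : Int) :
    ∀ n, (Fref N A S L n).length = (N+1).toNat
  | 0 => by unfold Fref finit; rw [PySem.List.length_pySetD]; simp
  | n+1 => by
    rw [Fref_succ]
    split
    · rw [PySem.List.length_pySetD]; exact length_Fref N A S L n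
    · exact length_Fref N A S L n

theorem getD_pySetD_ne (F : List Int) (i t v : Int) (hi : 0 ≤ i) (ht : 0 ≤ t) (hne : t ≠ i) :
    PySem.List.pyGetD (PySem.List.pySetD F i v) t 0 = PySem.List.pyGetD F t 0 := by
  rw [PySem.List.pySetD_of_nonneg F v hi, PySem.List.pyGetD_of_nonneg _ 0 ht,
    PySem.List.pyGetD_of_nonneg _ 0 ht, List.getD_eq_getElem?_getD, List.getD_eq_getElem?_getD,
    List.getElem?_set_ne (by omega)]

theorem getD_pySetD_self (F : List Int) (i v : Int) (hi : 0 ≤ i) (hlen : i.toNat < F.length) :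
    PySem.List.pyGetD (PySem.List.pySetD F i v) i 0 = v := by
  rw [PySem.List.pySetD_of_nonneg F v hi, PySem.List.pyGetD_of_nonneg _ 0 hi,
    List.getD_eq_getElem?_getD, List.getElem?_set_self (by simpa using hlen)]
  simp

theorem Fref_stable (N : Int) (A : List Int) (S L : Int) (m : Nat) :
    ∀ n, m ≤ n → ∀ t : Int, 0 ≤ t → t ≤ (m:Int) →
      PySem.List.pyGetD (Fref N A S L n) t 0 = PySem.List.pyGetD (Fref N A S L m) t 0 := by
  intro n
  induction n with
  | zero => intro h t _ _; have hm0 : m = 0 := by omega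
            subst hm0; rfl
  | succ n' ih =>
    intro h t ht0 htm
    by_cases hm : m = n' + 1
    · subst hm; rfl
    · have h2 : m ≤ n' := by omega
      rw [← ih h2 t ht0 htm]
      show PySem.List.pyGetD (Fref N A S L (n'+1)) t 0 = PySem.List.pyGetD (Fref N A S L n') t 0
      rw [Fref_succ]
      split
      · exact getD_pySetD_ne _ _ _ _ (by omega) ht0 (by omega)
      · rfl

theorem Fref_untouched (N : Int) (A : List Int) (S L : Int) (hN : 0 ≤ N) :
    ∀ (n : Nat), ∀ t : Int, (n:Int) < t → t ≤ N → PySem.List.pyGetD (Fref N A S L n) t 0 = N + 1 := by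
  intro n
  induction n with
  | zero =>
    intro t ht1 ht2
    rw [Fref_zero]
    unfold finit
    rw [getD_pySetD_ne _ _ _ _ (by omega) (by omega) (by omega),
      PySem.List.pyGetD_of_nonneg _ 0 (by omega),
      List.getD_replicate _ (by omega : t.toNat < (N+1).toNat)]
  | succ n' ih =>
    intro t ht1 ht2
    have hstep : PySem.List.pyGetD (Fref N A S L (n'+1)) t 0
        = PySem.List.pyGetD (Fref N A S L n') t 0 := by
      rw [Fref_succ]
      split
      · exact getD_pySetD_ne _ _ _ _ (by omega) (by omega) (by push_cast at ht1 ⊢; omega)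
      · rfl
    rw [hstep]
    exact ih t (by push_cast at ht1 ⊢; omega) ht2
def vF (N : Int) (A : List Int) (S L : Int) (k : Int) : Int :=
  PySem.List.pyGetD (Fref N A S L N.toNat) k 0
def nvF (N : Int) (A : List Int) (S L : Int) (k : Int) : Int := -(vF N A S L k)

def stateSpec (N : Int) (A : List Int) (S L : Int) (n : Nat) :
    List Int × List Int × Int × List (Int × Int) × List Int :=
  (mqSpec (ag A) (max (JA A S n) 1) (n:Int),
   mqSpec (nag A) (max (JA A S n) 1) (n:Int),
   JA A S n,
   (mqSpec (nvF N A S L) (max (JA A S n - 1) 0) ((n:Int) - L)).map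
     (fun k => (k, vF N A S L k)),
   Fref N A S L n)

theorem popBackWhile_map {α β : Type} (p : β → Bool) (f : α → β) (l : List α) :
    popBackWhile p (l.map f) = (popBackWhile (fun a => p (f a)) l).map f := by
  unfold popBackWhile
  rw [← List.map_reverse, List.dropWhile_map, ← List.map_reverse]
  rfl

theorem sMinV_vF_neg (N : Int) (A : List Int) (S L : Int) (l r : Int) (h : l ≤ r) :
    sMinV (vF N A S L) l r = -(sMaxV (nvF N A S L) l r) :=
  sMinV_neg (vF N A S L) l r h

theorem stepA (N : Int) (A : List Int) (S L : Int)
    (hN : 0 ≤ N) (hL : 1 ≤ L) (hlen : N < (A.length : Int)) (n : Nat) (hn : n < N.toNat) :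
    aStep A S L (stateSpec N A S L n) (1 + (n:Int)) = stateSpec N A S L (n+1) := by
  have h1n : (1 : Int) + (n:Int) = (n:Int) + 1 := by omega
  rw [h1n]
  have hJ0 := JA_nonneg A S n
  have hJle := JA_le A S n
  have hJ1 := JA_nonneg A S (n+1)
  have hJle1 := JA_le A S (n+1)
  have hJmono := JA_mono A S n
  -- push lemmas for the two value deques
  have hpush1 : popBackWhile
        (fun t => decide (PySem.List.pyGetD A t 0 ≤ PySem.List.pyGetD A ((n:Int)+1) 0))
        (mqSpec (ag A) (max (JA A S n) 1) (n:Int)) ++ [(n:Int)+1] =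
      mqSpec (ag A) (max (JA A S n) 1) ((n:Int)+1) := by
    have hc : (fun t => decide (PySem.List.pyGetD A t 0 ≤ PySem.List.pyGetD A ((n:Int)+1) 0)) =
        (fun t => decide (ag A t ≤ ag A ((n:Int)+1))) := rfl
    rw [hc]
    exact mqSpec_push (ag A) (max (JA A S n) 1) (n:Int) (by omega)
  have hpush2 : popBackWhile
        (fun t => decide (PySem.List.pyGetD A t 0 ≥ PySem.List.pyGetD A ((n:Int)+1) 0))
        (mqSpec (nag A) (max (JA A S n) 1) (n:Int)) ++ [(n:Int)+1] =
      mqSpec (nag A) (max (JA A S n) 1) ((n:Int)+1) := by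
    have hc : (fun t => decide (PySem.List.pyGetD A t 0 ≥ PySem.List.pyGetD A ((n:Int)+1) 0)) =
        (fun t => decide (nag A t ≤ nag A ((n:Int)+1))) := by
      funext t
      apply decide_eq_decide.mpr
      unfold nag ag
      omega
    rw [hc]
    exact mqSpec_push (nag A) (max (JA A S n) 1) (n:Int) (by omega)
  have hadv := aAdvance_spec A S ((n:Int)+1) (by omega)
    (((n:Int)+1 - JA A S n).toNat) (JA A S n) hJ0 (by omega)
  have hJdef : advJ A S ((n:Int)+1) (((n:Int)+1 - JA A S n).toNat) (JA A S n) = JA A S (n+1) := rfl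
  rw [hJdef] at hadv
  -- the candidate deque after push and front-drop
  have hstab : ∀ t : Int, 0 ≤ t → t ≤ (n:Int) →
      PySem.List.pyGetD (Fref N A S L n) t 0 = vF N A S L t := by
    intro t ht0 htn
    unfold vF
    exact (Fref_stable N A S L n N.toNat (by omega) t ht0 htn).symm
  have hq : (if ((n:Int)+1) ≥ L then
        popBackWhile (fun kv => decide (kv.2 ≥ PySem.List.pyGetD (Fref N A S L n) (((n:Int)+1) - L) 0))
          ((mqSpec (nvF N A S L) (max (JA A S n - 1) 0) ((n:Int) - L)).map
            (fun k => (k, vF N A S L k)))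
          ++ [((((n:Int)+1) - L, PySem.List.pyGetD (Fref N A S L n) (((n:Int)+1) - L) 0) : Int × Int)]
      else (mqSpec (nvF N A S L) (max (JA A S n - 1) 0) ((n:Int) - L)).map
            (fun k => (k, vF N A S L k))).dropWhile
        (fun kv => decide (kv.1 < JA A S (n+1) - 1)) =
      (mqSpec (nvF N A S L) (max (JA A S (n+1) - 1) 0) (((n:Int)+1) - L)).map
        (fun k => (k, vF N A S L k)) := by
    by_cases hiL : ((n:Int)+1) ≥ L
    · rw [if_pos hiL]
      have hval : PySem.List.pyGetD (Fref N A S L n) (((n:Int)+1) - L) 0 =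
          vF N A S L (((n:Int)+1) - L) := hstab _ (by omega) (by omega)
      rw [hval]
      by_cases hqlo : max (JA A S n - 1) 0 ≤ ((n:Int)+1) - L
      · -- push applies
        rw [popBackWhile_map]
        have hc : (fun k => (fun kv : Int × Int => decide (kv.2 ≥ vF N A S L (((n:Int)+1) - L)))
              ((k, vF N A S L k))) =
            (fun k => decide (nvF N A S L k ≤ nvF N A S L (((n:Int) - L) + 1))) := by
          funext k
          apply decide_eq_decide.mpr
          have he : ((n:Int)+1) - L = ((n:Int) - L) + 1 := by omega
          rw [he]
          unfold nvF
          omega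
        rw [hc]
        have happ : ([((((n:Int)+1) - L, vF N A S L (((n:Int)+1) - L)) : Int × Int)] : List (Int × Int)) =
            List.map (fun k => (k, vF N A S L k)) [((n:Int) - L) + 1] := by
          have he : ((n:Int)+1) - L = ((n:Int) - L) + 1 := by omega
          rw [he]
          rfl
        rw [happ, ← List.map_append,
          mqSpec_push (nvF N A S L) (max (JA A S n - 1) 0) ((n:Int) - L) (by omega),
          List.dropWhile_map]
        have hc2 : ((fun kv : Int × Int => decide (kv.1 < JA A S (n+1) - 1)) ∘
              (fun k => (k, vF N A S L k))) =
            (fun k => decide (k ≤ JA A S (n+1) - 2)) := by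
          funext k
          simp only [Function.comp]
          apply decide_eq_decide.mpr
          omega
        rw [hc2, mqSpec_dropFront]
        have hlo : max (max (JA A S n - 1) 0) (JA A S (n+1) - 2 + 1) = max (JA A S (n+1) - 1) 0 := by
          omega
        rw [hlo]
        have he : (n:Int) - L + 1 = ((n:Int)+1) - L := by omega
        rw [he]
      · -- old candidate deque is empty; the new element is dropped again
        rw [mqSpec_nil _ _ _ (by omega), List.map_nil]
        have hpb : popBackWhile (fun kv : Int × Int =>
            decide (kv.2 ≥ vF N A S L (((n:Int)+1) - L))) [] = [] := rfl
        rw [hpb, List.nil_append]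
        have hdrop : (([((((n:Int)+1) - L, vF N A S L (((n:Int)+1) - L)) : Int × Int)] :
            List (Int × Int)).dropWhile (fun kv => decide (kv.1 < JA A S (n+1) - 1))) = [] := by
          rw [List.dropWhile_cons_of_pos]
          · rfl
          · simp only [decide_eq_true_eq]
            omega
        rw [hdrop, mqSpec_nil _ _ _ (by omega), List.map_nil]
    · rw [if_neg hiL]
      rw [mqSpec_nil _ _ _ (by omega), List.map_nil, List.dropWhile_nil,
        mqSpec_nil _ _ _ (by omega), List.map_nil]
  -- now assemble
  show aStep A S L (stateSpec N A S L n) ((n:Int)+1) = stateSpec N A S L (n+1)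
  unfold aStep stateSpec
  simp only []
  rw [hpush1, hpush2, hadv, hq]
  have hcast : ((n+1 : Nat) : Int) = (n:Int) + 1 := by push_cast; ring
  rw [hcast]
  refine Prod.ext rfl (Prod.ext rfl (Prod.ext rfl (Prod.ext rfl ?_)))
  show (match ((mqSpec (nvF N A S L) (max (JA A S (n + 1) - 1) 0) ((n:Int) + 1 - L)).map
      (fun k => (k, vF N A S L k))).head? with
    | some kv => PySem.List.pySetD (Fref N A S L n) ((n:Int)+1) (kv.2 + 1)
    | none => Fref N A S L n) = Fref N A S L (n+1)
  by_cases hql : max (JA A S (n+1) - 1) 0 ≤ ((n:Int)+1) - L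
  · rcases mqSpec_head (nvF N A S L) (max (JA A S (n+1) - 1) 0) (((n:Int)+1) - L) hql with
      ⟨t, rest, heq, hv⟩
    rw [heq]
    show PySem.List.pySetD (Fref N A S L n) ((n:Int)+1) (vF N A S L t + 1) = Fref N A S L (n+1)
    have hvt : vF N A S L t + 1 =
        sMinV (fun k => PySem.List.pyGetD (Fref N A S L n) k 0)
          (max (JA A S (n+1) - 1) 0) (((n:Int)+1) - L) + 1 := by
      have h2 := sMinV_vF_neg N A S L (max (JA A S (n+1) - 1) 0) (((n:Int)+1) - L) hql
      have h3 : nvF N A S L t =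
          sMaxV (nvF N A S L) (max (JA A S (n+1) - 1) 0) (((n:Int)+1) - L) := hv
      have h4 := sMinV_congr (vF N A S L) (fun k => PySem.List.pyGetD (Fref N A S L n) k 0)
        (max (JA A S (n+1) - 1) 0) (((n:Int)+1) - L) hql
        (fun t' ht1 ht2 => (hstab t' (by omega) (by omega)).symm)
      unfold nvF at h2 h3
      omega
    rw [hvt, Fref_succ, if_pos hql]
  · rw [mqSpec_nil (nvF N A S L) (max (JA A S (n+1) - 1) 0) (((n:Int)+1) - L) (by omega),
      List.map_nil]
    show Fref N A S L n = Fref N A S L (n+1)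
    rw [Fref_succ, if_neg hql]
theorem runA_eq (N : Int) (A : List Int) (S L : Int)
    (hN : 0 ≤ N) (hL : 1 ≤ L) (hlen : N < (A.length : Int)) :
    ∀ n : Nat, n ≤ N.toNat →
      ((List.range n).map (fun k : Nat => (1:Int) + (k:Int))).foldl (aStep A S L)
        ([], [], 0, [], finit N) = stateSpec N A S L n := by
  intro n
  induction n with
  | zero =>
    intro _
    unfold stateSpec
    rw [show JA A S 0 = 0 from rfl,
      mqSpec_nil (ag A) (max 0 1) ((0:Nat):Int) (by norm_num),
      mqSpec_nil (nag A) (max 0 1) ((0:Nat):Int) (by norm_num),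
      mqSpec_nil (nvF N A S L) (max (0-1) 0) (((0:Nat):Int) - L) (by norm_num; omega),
      List.map_nil]
    rfl
  | succ n' ih =>
    intro hle
    rw [List.range_succ, List.map_append, List.foldl_append, ih (by omega)]
    simp only [List.map_cons, List.map_nil, List.foldl_cons, List.foldl_nil]
    exact stepA N A S L hN hL hlen n' (by omega)

theorem solveA_char (N : Int) (A : List Int) (S L : Int)
    (hN : 0 ≤ N) (hL : 1 ≤ L) (hlen : N < (A.length : Int)) :
    solve N S L A =
      (if PySem.List.pyGetD (Fref N A S L N.toNat) N 0 ≤ N then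
        PySem.List.pyGetD (Fref N A S L N.toNat) N 0 else -1) := by
  have hidx : (N + 1 - 1 : Int) = N := by ring
  have hrun := runA_eq N A S L hN hL hlen N.toNat le_rfl
  have h0 : solve N S L A =
      (if PySem.List.pyGetD ((List.foldl (aStep A S L) ([], [], 0, [], finit N)
          (PySem.List.pyRange 1 (N+1) 1)).2.2.2.2) (-1) 0 ≤ N then
        PySem.List.pyGetD ((List.foldl (aStep A S L) ([], [], 0, [], finit N)
          (PySem.List.pyRange 1 (N+1) 1)).2.2.2.2) (-1) 0 else -1) := rfl
  rw [h0, PySem.List.pyRange_one, hidx, hrun,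
    show (stateSpec N A S L N.toNat).2.2.2.2 = Fref N A S L N.toNat from rfl]
  have hne : Fref N A S L N.toNat ≠ [] := by
    have := length_Fref N A S L N.toNat
    intro hc
    rw [hc] at this
    simp at this
    omega
  have hget : PySem.List.pyGetD (Fref N A S L N.toNat) (-1) 0 =
      PySem.List.pyGetD (Fref N A S L N.toNat) N 0 := by
    rw [PySem.List.pyGetD_neg_one _ 0 hne, List.getLast_eq_getElem,
      PySem.List.pyGetD_of_nonneg _ 0 hN, List.getD_eq_getElem?_getD, List.getElem?_eq_getElem
        (by rw [length_Fref]; omega)]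
    have hidx2 : (Fref N A S L N.toNat).length - 1 = N.toNat := by
      rw [length_Fref]; omega
    simp only [hidx2]
    simp
  rw [hget]
theorem pySetD_getD_self (F : List Int) (i : Int) (hi : 0 ≤ i) (hlen : i.toNat < F.length) :
    PySem.List.pySetD F i (PySem.List.pyGetD F i 0) = F := by
  rw [PySem.List.pySetD_of_nonneg F _ hi, PySem.List.pyGetD_of_nonneg _ 0 hi,
    List.getD_eq_getElem?_getD, List.getElem?_eq_getElem hlen]
  simp

theorem pySetD_pySetD (F : List Int) (i v w : Int) (hi : 0 ≤ i) :
    PySem.List.pySetD (PySem.List.pySetD F i v) i w = PySem.List.pySetD F i w := by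
  rw [PySem.List.pySetD_of_nonneg F v hi, PySem.List.pySetD_of_nonneg _ w hi,
    PySem.List.pySetD_of_nonneg F w hi, List.set_set]

theorem mfold_congr (g g' : Int → Int) (ks : List Int) (hg : ∀ k ∈ ks, g k = g' k) :
    ∀ c : Int, ks.foldl (fun c k => min c (g k)) c = ks.foldl (fun c k => min c (g' k)) c := by
  induction ks with
  | nil => intro c; rfl
  | cons x xs ih =>
    intro c
    simp only [List.foldl_cons]
    rw [hg x List.mem_cons_self]
    exact ih (fun k hk => hg k (List.mem_cons_of_mem _ hk)) _

theorem mfold_min_comm (g : Int → Int) :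
    ∀ (l : List Int) (c x : Int),
      l.foldl (fun c k => min c (g k)) (min c x) = min (l.foldl (fun c k => min c (g k)) c) x := by
  intro l
  induction l with
  | nil => intro c x; rfl
  | cons y ys ih =>
    intro c x
    simp only [List.foldl_cons]
    rw [min_right_comm c x (g y)]
    exact ih (min c (g y)) x

def bPred (A : List Int) (S L i : Int) : Int → Bool :=
  fun k => decide (L ≤ i - k) && decide (rngI A (k+1) i ≤ S)

theorem bInner_zero (A : List Int) (S L i : Int) (k mx mn : Int) (F : List Int) :
    bInner A S L i 0 k mx mn F = F := rfl

theorem bInner_succ (A : List Int) (S L i : Int) (m : Nat) (k mx mn : Int) (F : List Int) :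
    bInner A S L i (m+1) k mx mn F =
      (if 0 ≤ k then
        if S < mx - mn then F
        else
          bInner A S L i m (k-1)
            (if mx < PySem.List.pyGetD A k 0 then PySem.List.pyGetD A k 0 else mx)
            (if PySem.List.pyGetD A k 0 < mn then PySem.List.pyGetD A k 0 else mn)
            (if L ≤ i - k ∧ PySem.List.pyGetD F k 0 + 1 < PySem.List.pyGetD F i 0 then
              PySem.List.pySetD F i (PySem.List.pyGetD F k 0 + 1) else F)
      else F) := rfl


theorem bInner_spec (A : List Int) (S L i : Int) (hi0 : 0 < i) :
    ∀ (m : Nat) (k : Int) (F : List Int), (k+1).toNat = m → k < i → -1 ≤ k →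
      i.toNat < F.length →
      bInner A S L i m k (sMaxV (ag A) (k+1) i) (sMinV (ag A) (k+1) i) F =
        PySem.List.pySetD F i
          (((irange 0 k).filter (bPred A S L i)).foldl
            (fun c k' => min c (PySem.List.pyGetD F k' 0 + 1)) (PySem.List.pyGetD F i 0)) := by
  intro m
  induction m with
  | zero =>
    intro k F hm hk hk1 hlen
    have hkm : k = -1 := by omega
    subst hkm
    rw [bInner_zero, irange_nil 0 (-1) (by omega)]
    show F = PySem.List.pySetD F i
      (List.foldl (fun c k' => min c (PySem.List.pyGetD F k' 0 + 1))
        (PySem.List.pyGetD F i 0) (List.filter (bPred A S L i) []))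
    rw [List.filter_nil, List.foldl_nil, pySetD_getD_self F i (by omega) hlen]
  | succ m ih =>
    intro k F hm hk hk1 hlen
    have hk0 : 0 ≤ k := by omega
    rw [bInner_succ, if_pos hk0]
    by_cases hbrk : S < sMaxV (ag A) (k+1) i - sMinV (ag A) (k+1) i
    · rw [if_pos hbrk]
      have hnil : (irange 0 k).filter (bPred A S L i) = [] := by
        rw [List.filter_eq_nil_iff]
        intro k' hk'
        rw [mem_irange] at hk'
        unfold bPred
        have h1 : sMaxV (ag A) (k+1) i ≤ sMaxV (ag A) (k'+1) i :=
          sMaxV_mono_left (ag A) (k'+1) (k+1) i (by omega) (by omega)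
        have h2 : sMinV (ag A) (k'+1) i ≤ sMinV (ag A) (k+1) i :=
          sMinV_mono_left (ag A) (k'+1) (k+1) i (by omega) (by omega)
        unfold rngI
        simp only [Bool.and_eq_true, decide_eq_true_eq, not_and, not_le]
        intro _
        omega
      rw [hnil, List.foldl_nil, pySetD_getD_self F i (by omega) hlen]
    · rw [if_neg hbrk]
      -- the updated table
      set c := PySem.List.pyGetD F i 0 with hc
      set F' := if L ≤ i - k ∧ PySem.List.pyGetD F k 0 + 1 < PySem.List.pyGetD F i 0 then
          PySem.List.pySetD F i (PySem.List.pyGetD F k 0 + 1) else F with hF'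
      have hmx : (if sMaxV (ag A) (k+1) i < PySem.List.pyGetD A k 0 then
            PySem.List.pyGetD A k 0 else sMaxV (ag A) (k+1) i) = sMaxV (ag A) ((k-1)+1) i := by
        have h1 : sMaxV (ag A) k i = max (ag A k) (sMaxV (ag A) (k+1) i) :=
          sMaxV_cons (ag A) k i (by omega)
        have h2 : ((k-1)+1 : Int) = k := by ring
        rw [h2, h1]
        have hagk : ag A k = PySem.List.pyGetD A k 0 := rfl
        rcases lt_or_ge (sMaxV (ag A) (k+1) i) (PySem.List.pyGetD A k 0) with h | h
        · rw [if_pos h]; omega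
        · rw [if_neg (by omega)]; omega
      have hmn : (if PySem.List.pyGetD A k 0 < sMinV (ag A) (k+1) i then
            PySem.List.pyGetD A k 0 else sMinV (ag A) (k+1) i) = sMinV (ag A) ((k-1)+1) i := by
        have h1 : sMinV (ag A) k i = min (ag A k) (sMinV (ag A) (k+1) i) :=
          sMinV_cons (ag A) k i (by omega)
        have h2 : ((k-1)+1 : Int) = k := by ring
        rw [h2, h1]
        have hagk : ag A k = PySem.List.pyGetD A k 0 := rfl
        rcases lt_or_ge (PySem.List.pyGetD A k 0) (sMinV (ag A) (k+1) i) with h | h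
        · rw [if_pos h]; omega
        · rw [if_neg (by omega)]; omega
      have hlen' : i.toNat < F'.length := by
        rw [hF']
        split
        · rw [PySem.List.length_pySetD]; exact hlen
        · exact hlen
      rw [hmx, hmn, ih (k-1) F' (by omega) (by omega) (by omega) hlen']
      -- rewrite the RHS interval
      have hsplit : irange 0 k = irange 0 (k-1) ++ [k] := irange_append 0 k hk0
      rw [hsplit, List.filter_append]
      have hFk' : ∀ k' : Int, 0 ≤ k' → k' < i →  k' ≠ i →
          PySem.List.pyGetD F' k' 0 = PySem.List.pyGetD F k' 0 := by
        intro k' h0 h1 h2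
        rw [hF']
        split
        · exact getD_pySetD_ne F i k' _ (by omega) h0 h2
        · rfl
      have hcongr : ∀ c0 : Int,
          ((irange 0 (k-1)).filter (bPred A S L i)).foldl
            (fun c k' => min c (PySem.List.pyGetD F' k' 0 + 1)) c0 =
          ((irange 0 (k-1)).filter (bPred A S L i)).foldl
            (fun c k' => min c (PySem.List.pyGetD F k' 0 + 1)) c0 := by
        intro c0
        apply mfold_congr (fun k' => PySem.List.pyGetD F' k' 0 + 1)
          (fun k' => PySem.List.pyGetD F k' 0 + 1)
        intro k' hk'
        rcases List.mem_filter.mp hk' with ⟨hk'1, _⟩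
        rw [mem_irange] at hk'1
        rw [hFk' k' (by omega) (by omega) (by omega)]
      by_cases hLk : L ≤ i - k
      · have hfk : (bPred A S L i) k = true := by
          unfold bPred rngI
          simp only [Bool.and_eq_true, decide_eq_true_eq]
          exact ⟨hLk, by omega⟩
        rw [List.filter_cons_of_pos hfk, List.filter_nil]
        have hseed : PySem.List.pyGetD F' i 0 = min c (PySem.List.pyGetD F k 0 + 1) := by
          rw [hF']
          by_cases hcond : PySem.List.pyGetD F k 0 + 1 < PySem.List.pyGetD F i 0
          · rw [if_pos ⟨hLk, hcond⟩, getD_pySetD_self F i _ (by omega) hlen]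
            omega
          · rw [if_neg (by tauto)]
            omega
        rw [hseed, mfold_min_comm, hcongr]
        have hps : PySem.List.pySetD F' i
            (min (((irange 0 (k-1)).filter (bPred A S L i)).foldl
              (fun c k' => min c (PySem.List.pyGetD F k' 0 + 1)) c)
              (PySem.List.pyGetD F k 0 + 1)) =
            PySem.List.pySetD F i
            (min (((irange 0 (k-1)).filter (bPred A S L i)).foldl
              (fun c k' => min c (PySem.List.pyGetD F k' 0 + 1)) c)
              (PySem.List.pyGetD F k 0 + 1)) := by
          rw [hF']
          split
          · rw [pySetD_pySetD F i _ _ (by omega)]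
          · rfl
        rw [hps]
        have hfold : ((irange 0 (k-1)).filter (bPred A S L i) ++ [k]).foldl
            (fun c k' => min c (PySem.List.pyGetD F k' 0 + 1)) c =
            min (((irange 0 (k-1)).filter (bPred A S L i)).foldl
              (fun c k' => min c (PySem.List.pyGetD F k' 0 + 1)) c)
              (PySem.List.pyGetD F k 0 + 1) := by
          rw [List.foldl_append]
          rfl
        rw [hfold]
      · have hfk : (bPred A S L i) k = false := by
          unfold bPred
          simp only [Bool.and_eq_false_iff, decide_eq_false_iff_not, not_le]
          left; omega
        rw [List.filter_cons_of_neg (by simp [hfk]), List.filter_nil, List.append_nil]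
        have hF'F : F' = F := by
          rw [hF', if_neg (by tauto)]
        rw [hF'F, ← hc]
def FrefB (N : Int) (A : List Int) (S L : Int) : Nat → List Int
  | 0 => finit N
  | n+1 =>
    PySem.List.pySetD (FrefB N A S L n) ((n:Int)+1)
      (((irange 0 (n:Int)).filter (bPred A S L ((n:Int)+1))).foldl
        (fun c k' => min c (PySem.List.pyGetD (FrefB N A S L n) k' 0 + 1)) (N+1))

theorem FrefB_zero (N : Int) (A : List Int) (S L : Int) : FrefB N A S L 0 = finit N := rfl

theorem FrefB_succ (N : Int) (A : List Int) (S L : Int) (n : Nat) :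
    FrefB N A S L (n+1) =
      PySem.List.pySetD (FrefB N A S L n) ((n:Int)+1)
        (((irange 0 (n:Int)).filter (bPred A S L ((n:Int)+1))).foldl
          (fun c k' => min c (PySem.List.pyGetD (FrefB N A S L n) k' 0 + 1)) (N+1)) := rfl

theorem length_FrefB (N : Int) (A : List Int) (S L : Int) :
    ∀ n, (FrefB N A S L n).length = (N+1).toNat
  | 0 => by rw [FrefB_zero]; unfold finit; rw [PySem.List.length_pySetD]; simp
  | n+1 => by rw [FrefB_succ, PySem.List.length_pySetD]; exact length_FrefB N A S L n

theorem FrefB_stable (N : Int) (A : List Int) (S L : Int) (m : Nat) :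
    ∀ n, m ≤ n → ∀ t : Int, 0 ≤ t → t ≤ (m:Int) →
      PySem.List.pyGetD (FrefB N A S L n) t 0 = PySem.List.pyGetD (FrefB N A S L m) t 0 := by
  intro n
  induction n with
  | zero => intro h t _ _; have hm0 : m = 0 := by omega
            subst hm0; rfl
  | succ n' ih =>
    intro h t ht0 htm
    by_cases hm : m = n' + 1
    · subst hm; rfl
    · rw [← ih (by omega) t ht0 htm, FrefB_succ]
      exact getD_pySetD_ne _ _ _ _ (by omega) ht0 (by omega)

theorem FrefB_untouched (N : Int) (A : List Int) (S L : Int) (hN : 0 ≤ N) :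
    ∀ (n : Nat), ∀ t : Int, (n:Int) < t → t ≤ N →
      PySem.List.pyGetD (FrefB N A S L n) t 0 = N + 1 := by
  intro n
  induction n with
  | zero =>
    intro t ht1 ht2
    rw [FrefB_zero]
    unfold finit
    rw [getD_pySetD_ne _ _ _ _ (by omega) (by omega) (by omega),
      PySem.List.pyGetD_of_nonneg _ 0 (by omega),
      List.getD_replicate _ (by omega : t.toNat < (N+1).toNat)]
  | succ n' ih =>
    intro t ht1 ht2
    rw [FrefB_succ, getD_pySetD_ne _ _ _ _ (by omega) (by omega)
      (by push_cast at ht1 ⊢; omega)]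
    exact ih t (by push_cast at ht1 ⊢; omega) ht2

theorem stepB (N : Int) (A : List Int) (S L : Int)
    (hN : 0 ≤ N) (hL : 1 ≤ L) (n : Nat) (hn : n < N.toNat) :
    bInner A S L (1 + (n:Int)) (1 + (n:Int)).toNat (1 + (n:Int) - 1)
      (PySem.List.pyGetD A (1 + (n:Int)) 0) (PySem.List.pyGetD A (1 + (n:Int)) 0)
      (FrefB N A S L n) = FrefB N A S L (n+1) := by
  have h1n : (1 : Int) + (n:Int) = (n:Int) + 1 := by omega
  rw [h1n]
  have hlen : ((n:Int)+1).toNat < (FrefB N A S L n).length := by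
    rw [length_FrefB]; omega
  have hs := bInner_spec A S L ((n:Int)+1) (by omega) ((n:Int)+1).toNat ((n:Int)+1-1)
    (FrefB N A S L n) (by omega) (by omega) (by omega) hlen
  rw [show ((n:Int)+1-1+1 : Int) = (n:Int)+1 from by ring] at hs
  rw [sMaxV_self, sMinV_self] at hs
  rw [show ag A ((n:Int)+1) = PySem.List.pyGetD A ((n:Int)+1) 0 from rfl] at hs
  rw [show ((n:Int)+1-1 : Int) = (n:Int) from by ring] at hs
  rw [FrefB_untouched N A S L hN n ((n:Int)+1) (by omega) (by omega)] at hs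
  rw [show ((n:Int)+1-1 : Int) = (n:Int) from by ring, hs, FrefB_succ]

theorem runB_eq (N : Int) (A : List Int) (S L : Int)
    (hN : 0 ≤ N) (hL : 1 ≤ L) :
    ∀ n : Nat, n ≤ N.toNat →
      ((List.range n).map (fun k : Nat => (1:Int) + (k:Int))).foldl
        (fun F i => bInner A S L i i.toNat (i-1)
          (PySem.List.pyGetD A i 0) (PySem.List.pyGetD A i 0) F) (finit N) =
        FrefB N A S L n := by
  intro n
  induction n with
  | zero => intro _; rfl
  | succ n' ih =>
    intro hle
    rw [List.range_succ, List.map_append, List.foldl_append, ih (by omega)]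
    simp only [List.map_cons, List.map_nil, List.foldl_cons, List.foldl_nil]
    exact stepB N A S L hN hL n' (by omega)

theorem solveB_char (N : Int) (A : List Int) (S L : Int)
    (hN : 0 ≤ N) (hL : 1 ≤ L) :
    solve_alt N S L A =
      (if PySem.List.pyGetD (FrefB N A S L N.toNat) N 0 ≤ N then
        PySem.List.pyGetD (FrefB N A S L N.toNat) N 0 else -1) := by
  have hidx : (N + 1 - 1 : Int) = N := by ring
  have hrun := runB_eq N A S L hN hL N.toNat le_rfl
  have h0 : solve_alt N S L A =
      (if PySem.List.pyGetD ((PySem.List.pyRange 1 (N+1) 1).foldl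
          (fun F i => bInner A S L i i.toNat (i-1)
            (PySem.List.pyGetD A i 0) (PySem.List.pyGetD A i 0) F) (finit N)) N 0 ≤ N then
        PySem.List.pyGetD ((PySem.List.pyRange 1 (N+1) 1).foldl
          (fun F i => bInner A S L i i.toNat (i-1)
            (PySem.List.pyGetD A i 0) (PySem.List.pyGetD A i 0) F) (finit N)) N 0 else -1) := rfl
  rw [h0, PySem.List.pyRange_one, hidx, hrun]
theorem filter_irange_le (d : Int) :
    ∀ (l r : Int), (irange l r).filter (fun t => decide (t ≤ d)) = irange l (min r d) := by
  intro l r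
  induction hd : (r + 1 - l).toNat generalizing l with
  | zero =>
    rw [irange_nil _ _ (by omega), irange_nil _ _ (by omega)]; rfl
  | succ n ih =>
    rw [irange_cons _ _ (by omega)]
    by_cases hc : l ≤ d
    · rw [List.filter_cons_of_pos (by simp [hc]), ih (l+1) (by omega),
        irange_cons l (min r d) (by omega)]
    · rw [List.filter_cons_of_neg (by simp; omega), ih (l+1) (by omega),
        irange_nil (l+1) (min r d) (by omega), irange_nil l (min r d) (by omega)]

theorem mfold_irange (g : Int → Int) (l r c : Int) (h : l ≤ r) :
    (irange l r).foldl (fun c k => min c (g k)) c = min c (sMinV g l r) := by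
  unfold sMinV
  rw [irange_cons l r h, List.foldl_cons]
  exact foldl_min_init g (irange (l+1) r) c (g l)

theorem sMinV_min_congr (vA vB : Int → Int) (M l r : Int) (hlr : l ≤ r)
    (h : ∀ t, l ≤ t → t ≤ r → min (vA t) M = min (vB t) M) :
    min (sMinV vA l r) M = min (sMinV vB l r) M := by
  induction hd : (r - l).toNat generalizing r with
  | zero =>
    have hrl : l = r := by omega
    subst hrl
    rw [sMinV_self, sMinV_self]
    exact h l le_rfl le_rfl
  | succ n ih =>
    have hlr' : l < r := by omega
    rw [sMinV_last vA l r hlr', sMinV_last vB l r hlr']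
    have h1 := ih (r-1) (by omega) (fun t a b => h t a (by omega)) (by omega)
    have h2 := h r (by omega) le_rfl
    omega

theorem Jchar (N : Int) (A : List Int) (S L : Int)
    (hN : 0 ≤ N) (hL : 1 ≤ L) (hND : ¬ (1 ≤ N ∧ L = 1 ∧ S < 0))
    (n : Nat) (hn : n < N.toNat) (k : Int) (hk0 : 0 ≤ k) (hk1 : k ≤ ((n:Int)+1) - L) :
    rngI A (k+1) ((n:Int)+1) ≤ S ↔ JA A S (n+1) - 1 ≤ k := by
  constructor
  · intro hr
    by_contra hc
    have hlt : k + 1 < JA A S (n+1) := by omega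
    have hm := JA_min A S (n+1) (k+1) (by omega) hlt
    rw [show max (k+1) 1 = k+1 from by omega] at hm
    push_cast at hm
    omega
  · intro hj
    rcases JA_exit A S n with hJi | hJr
    · have hL1 : L = 1 := by omega
      have hk : k = (n:Int) := by omega
      subst hk
      have hN1 : 1 ≤ N := by omega
      have hS : 0 ≤ S := by by_contra hq; exact hND ⟨hN1, hL1, by omega⟩
      unfold rngI
      rw [sMaxV_self, sMinV_self]
      omega
    · have h1 : max (JA A S (n+1)) 1 ≤ k+1 := by omega
      have h2 : k+1 ≤ (n:Int)+1 := by omega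
      have h3 := sMaxV_mono_left (ag A) (max (JA A S (n+1)) 1) (k+1) ((n:Int)+1) h1 h2
      have h4 := sMinV_mono_left (ag A) (max (JA A S (n+1)) 1) (k+1) ((n:Int)+1) h1 h2
      unfold rngI at hJr ⊢
      omega

theorem bridge (N : Int) (A : List Int) (S L : Int)
    (hN : 0 ≤ N) (hL : 1 ≤ L) (hND : ¬ (1 ≤ N ∧ L = 1 ∧ S < 0)) :
    ∀ n : Nat, n ≤ N.toNat → ∀ t : Int, 0 ≤ t → t ≤ (n:Int) →
      min (PySem.List.pyGetD (Fref N A S L n) t 0) (N+1) =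
        min (PySem.List.pyGetD (FrefB N A S L n) t 0) (N+1) := by
  intro n
  induction n with
  | zero =>
    intro _ t ht0 ht1
    have ht : t = 0 := by norm_num at ht1; omega
    subst ht
    rw [Fref_zero, FrefB_zero]
  | succ n' ih =>
    intro hle t ht0 ht1
    by_cases htn : t ≤ (n':Int)
    · rw [Fref_stable N A S L n' (n'+1) (by omega) t ht0 htn,
        FrefB_stable N A S L n' (n'+1) (by omega) t ht0 htn]
      exact ih (by omega) t ht0 htn
    · have hti : t = (n':Int)+1 := by push_cast at ht1; omega
      subst hti
      have hlenA : (((n':Int)+1)).toNat < (Fref N A S L n').length := by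
        rw [length_Fref]; omega
      have hlenB : (((n':Int)+1)).toNat < (FrefB N A S L n').length := by
        rw [length_FrefB]; omega
      -- the B-side written value
      rw [FrefB_succ, getD_pySetD_self _ _ _ (by omega) hlenB]
      -- the candidate list is an interval
      have hfilter : (irange 0 (n':Int)).filter (bPred A S L ((n':Int)+1)) =
          irange (max (JA A S (n'+1) - 1) 0) (((n':Int)+1) - L) := by
        have hcongr : (irange 0 (n':Int)).filter (bPred A S L ((n':Int)+1)) =
            (irange 0 (n':Int)).filter (fun k =>
              decide (max (JA A S (n'+1) - 1) 0 ≤ k) && decide (k ≤ ((n':Int)+1) - L)) := by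
          apply List.filter_congr
          intro k hk
          rw [mem_irange] at hk
          by_cases hkL : k ≤ ((n':Int)+1) - L
          · have hch := Jchar N A S L hN hL hND n' (by omega) k (by omega) hkL
            unfold bPred
            by_cases hr : rngI A (k+1) ((n':Int)+1) ≤ S
            · simp only [hr, decide_true, Bool.and_true, hkL]
              simp only [show (L ≤ ((n':Int)+1) - k) = True from by simp; omega, decide_true]
              simp [show max (JA A S (n'+1) - 1) 0 ≤ k from by omega]
            · simp only [hr, decide_false, Bool.and_false]
              have : ¬ max (JA A S (n'+1) - 1) 0 ≤ k := by omega
              simp [this]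
          · unfold bPred
            simp only [show ¬ (L ≤ ((n':Int)+1) - k) from by omega, decide_false,
              Bool.false_and]
            simp [hkL]
        rw [hcongr]
        have hsplit : (fun k : Int =>
            decide (max (JA A S (n'+1) - 1) 0 ≤ k) && decide (k ≤ ((n':Int)+1) - L)) =
            (fun k : Int => decide (max (JA A S (n'+1) - 1) 0 ≤ k) &&
              (fun k : Int => decide (k ≤ ((n':Int)+1) - L)) k) := rfl
        rw [hsplit, ← List.filter_filter, filter_irange_le,
          show min (n':Int) (((n':Int)+1) - L) = ((n':Int)+1) - L from by omega,
          filter_irange,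
          show max 0 (max (JA A S (n'+1) - 1) 0) = max (JA A S (n'+1) - 1) 0 from by omega]
      rw [hfilter]
      by_cases hql : max (JA A S (n'+1) - 1) 0 ≤ ((n':Int)+1) - L
      · -- both sides take an interval minimum
        rw [Fref_succ, if_pos hql, getD_pySetD_self _ _ _ (by omega) hlenA,
          mfold_irange _ _ _ _ hql]
        have hadd : sMinV (fun k => PySem.List.pyGetD (FrefB N A S L n') k 0 + 1)
            (max (JA A S (n'+1) - 1) 0) (((n':Int)+1) - L) =
            sMinV (fun k => PySem.List.pyGetD (FrefB N A S L n') k 0)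
              (max (JA A S (n'+1) - 1) 0) (((n':Int)+1) - L) + 1 :=
          sMinV_add_one _ _ _ hql
        rw [hadd]
        have hm := sMinV_min_congr (fun k => PySem.List.pyGetD (Fref N A S L n') k 0)
          (fun k => PySem.List.pyGetD (FrefB N A S L n') k 0) (N+1)
          (max (JA A S (n'+1) - 1) 0) (((n':Int)+1) - L) hql
          (fun t' h1 h2 => ih (by omega) t' (by omega) (by omega))
        omega
      · -- no candidate: both sides keep N+1
        rw [Fref_succ, if_neg hql,
          Fref_untouched N A S L hN n' ((n':Int)+1) (by omega) (by omega),
          irange_nil _ _ (by omega), List.foldl_nil]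
theorem castS (n : Nat) : ((n+1:Nat):Int) = (n:Int)+1 := by push_cast; ring

theorem rngI_nonneg (A : List Int) (l r : Int) (h : l ≤ r) : 0 ≤ rngI A l r := by
  have h1 := le_sMaxV (ag A) l r l le_rfl h
  have h2 := sMinV_le (ag A) l r l le_rfl h
  unfold rngI
  omega

theorem JA_all (A : List Int) (S : Int) (hS : S < 0) (n : Nat) :
    JA A S (n+1) = (n:Int)+1 := by
  rcases JA_exit A S n with h | h
  · exact h
  · exfalso
    have hle := JA_le A S (n+1)
    push_cast at hle
    have := rngI_nonneg A (max (JA A S (n+1)) 1) ((n:Int)+1) (by omega)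
    omega

theorem FrefD_val (N : Int) (A : List Int) (S L : Int)
    (hN : 1 ≤ N) (hS : S < 0) (hL1 : L = 1) :
    ∀ n : Nat, n ≤ N.toNat → PySem.List.pyGetD (Fref N A S L n) (n:Int) 0 = (n:Int)
  | 0, h => by
    rw [Fref_zero]
    unfold finit
    rw [show ((0:Nat):Int) = 0 from rfl,
      getD_pySetD_self _ _ _ le_rfl (by simp; omega)]
  | n+1, h => by
    subst hL1
    rw [Fref_succ, JA_all A S hS n]
    rw [castS n, if_pos (by omega)]
    rw [getD_pySetD_self _ _ _ (by omega) (by rw [length_Fref]; omega)]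
    rw [show max (((n:Int)+1) - 1) 0 = (n:Int) from by omega,
      show ((n:Int)+1-1 : Int) = (n:Int) from by ring, sMinV_self]
    have hv := FrefD_val N A S 1 hN hS rfl n (by omega)
    show PySem.List.pyGetD (Fref N A S 1 n) (n:Int) 0 + 1 = (n:Int)+1
    omega

theorem FrefBD_val (N : Int) (A : List Int) (S L : Int)
    (hN : 1 ≤ N) (hS : S < 0) :
    ∀ n : Nat, 1 ≤ n → n ≤ N.toNat → PySem.List.pyGetD (FrefB N A S L n) (n:Int) 0 = N+1 := by
  intro n h1 h2
  rcases n with _ | m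
  · omega
  rw [FrefB_succ, castS m,
    getD_pySetD_self _ _ _ (by omega) (by rw [length_FrefB]; omega)]
  have hnil : (irange 0 (m:Int)).filter (bPred A S L ((m:Int)+1)) = [] := by
    rw [List.filter_eq_nil_iff]
    intro k hk
    rw [mem_irange] at hk
    unfold bPred
    have := rngI_nonneg A (k+1) ((m:Int)+1) (by omega)
    simp only [Bool.and_eq_true, decide_eq_true_eq, not_and, not_le]
    intro _
    omega
  rw [hnil, List.foldl_nil]

theorem solve_spec' (N : Int) (S : Int) (L : Int) (A : List Int)
    (hpre : Pre_solve N S L A) (hnd : ¬ D_solve N S L A) :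
    solve N S L A = solve_alt N S L A := by
  obtain ⟨hN, hL, hlen⟩ := hpre
  have hND : ¬ (1 ≤ N ∧ L = 1 ∧ S < 0) := hnd
  rw [solveA_char N A S L hN hL hlen, solveB_char N A S L hN hL]
  have hbr := bridge N A S L hN hL hND N.toNat le_rfl N hN (by omega)
  split_ifs <;> omega

theorem solve_tight' (N : Int) (S : Int) (L : Int) (A : List Int)
    (hpre : Pre_solve N S L A) (hd : D_solve N S L A) :
    solve N S L A ≠ solve_alt N S L A := by
  obtain ⟨hN, hL, hlen⟩ := hpre
  obtain ⟨hN1, hL1, hS⟩ := hd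
  rw [solveA_char N A S L hN hL hlen, solveB_char N A S L hN hL]
  have hcast : ((N.toNat : Nat) : Int) = N := by omega
  have hA := FrefD_val N A S L hN1 hS hL1 N.toNat le_rfl
  rw [hcast] at hA
  have hB := FrefBD_val N A S L hN1 hS N.toNat (by omega) le_rfl
  rw [hcast] at hB
  rw [hA, hB, if_pos le_rfl, if_neg (by omega)]
  omega

-- ===== VERDICT (by name: the statement is the Claim_ definition above) =====
theorem solve_spec : Claim_unchanged_solve := by
  unfold Claim_unchanged_solve
  intro N S L A _ hpre
  unfold Spec_solve
  intro hnd
  exact solve_spec' N S L A hpre hnd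

theorem solve_changed : Claim_changed_solve := by
  unfold Claim_changed_solve; decide

theorem solve_tight : Claim_exact_solve := by
  unfold Claim_exact_solve
  intro N S L A _ hpre hd
  exact solve_tight' N S L A hpre hd
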